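-- pv_equiv track=rewrite | github.com/renansilva42/vendedor-smart | app/chatbot/whatsapp_new.py | _get_conversation_timerange
-- ===== SOURCE A (Python) =====
-- from typing import Dict, List, Any, Optional
--
-- def _get_conversation_timerange(
--
--     messages: List[Dict[str, Any]]
-- ) -> Dict[str, str]:
--     """Get the time range of a conversation."""
--     if not messages:
--         return {"start": None, "end": None}
--
--     timestamps = [msg.get("timestamp") for msg in messages if msg.get("timestamp")]
--     if not timestamps:
--         return {"start": None, "end": None}
--
--     return {
--         "start": min(timestamps),
--         "end": max(timestamps)
--     }
-- ===== SOURCE B (Python) =====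
-- from typing import Dict, List, Any
--
--
-- def _get_conversation_timerange(
--     messages: List[Dict[str, Any]]
-- ) -> Dict[str, str]:
--     """Get the time range of a conversation (single pass)."""
--     rng = None
--     for msg in messages:
--         ts = msg.get("timestamp")
--         if not ts:
--             continue
--         if rng is None:
--             rng = (ts, ts)
--         else:
--             lo, hi = rng
--             rng = (ts if ts < lo else lo, ts if hi < ts else hi)
--     if rng is None:
--         return {"start": None, "end": None}
--     return {"start": rng[0], "end": rng[1]}
-- ===== Notes on version B (the rewrite author's own statement) =====
-- stated objective: simpler
-- what changed: Replaced the intermediate timestamps list plus separate min and max scans with one fold over the messages keeping a running (lo, hi) pair.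
import Mathlib
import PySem

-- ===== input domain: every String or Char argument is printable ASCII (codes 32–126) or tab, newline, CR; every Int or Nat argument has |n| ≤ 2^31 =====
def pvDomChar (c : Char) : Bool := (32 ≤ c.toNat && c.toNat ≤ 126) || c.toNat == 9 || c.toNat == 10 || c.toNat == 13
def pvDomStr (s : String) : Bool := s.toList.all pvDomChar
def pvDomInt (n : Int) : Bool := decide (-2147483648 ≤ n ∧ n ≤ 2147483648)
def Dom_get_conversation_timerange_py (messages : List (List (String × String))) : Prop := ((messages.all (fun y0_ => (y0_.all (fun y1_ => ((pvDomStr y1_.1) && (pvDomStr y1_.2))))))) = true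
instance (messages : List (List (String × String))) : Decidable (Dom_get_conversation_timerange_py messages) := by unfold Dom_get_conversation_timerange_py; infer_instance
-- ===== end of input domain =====

-- B replaces the intermediate timestamps list plus separate min and max scans with one fold keeping a running (lo, hi) pair (simpler decomposition, same cost).


-- ===== PORT A =====
-- truthiness of msg.get("timestamp"): present and non-empty string
def pvTsOf (msg : List (String × String)) : Option String :=
  match (PySem.Dict.mk msg).get? "timestamp" with
  | none => none
  | some s => if s = "" then none else some s

def get_conversation_timerange_py (messages : List (List (String × String))) : List (String × Option String) :=
  if messages = [] then [("start", none), ("end", none)]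
  else
    let timestamps := messages.filterMap pvTsOf
    if timestamps = [] then [("start", none), ("end", none)]
    else [("start", PySem.List.min? timestamps (fun y => y)),
          ("end", PySem.List.max? timestamps (fun y => y))]

-- ===== PORT B =====
def pvAltStep (rng : Option (String × String)) (msg : List (String × String)) :
    Option (String × String) :=
  match (PySem.Dict.mk msg).get? "timestamp" with
  | none => rng
  | some ts =>
    if ts = "" then rng
    else
      match rng with
      | none => some (ts, ts)
      | some (lo, hi) => some ((if ts < lo then ts else lo), (if hi < ts then ts else hi))

def get_conversation_timerange_py_alt (messages : List (List (String × String))) : List (String × Option String) :=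
  match messages.foldl pvAltStep none with
  | none => [("start", none), ("end", none)]
  | some (lo, hi) => [("start", some lo), ("end", some hi)]

-- ===== PRECONDITION & SPEC =====
def Spec_get_conversation_timerange_py (messages : List (List (String × String))) (out : List (String × Option String)) : Prop := out = get_conversation_timerange_py_alt messages
instance (messages : List (List (String × String))) (out : List (String × Option String)) : Decidable (Spec_get_conversation_timerange_py messages out) := by unfold Spec_get_conversation_timerange_py; infer_instance

-- ===== CLAIM (what is proved, stated in full; the proofs are below) =====
def Claim_equal_get_conversation_timerange_py : Prop := ∀ (messages : List (List (String × String))), Dom_get_conversation_timerange_py messages → Spec_get_conversation_timerange_py messages (get_conversation_timerange_py messages)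

-- ===== LEMMAS AND PROOFS =====

theorem pv_min_alt (lo s : String) : (if s < lo then s else lo) = min lo s := by
  by_cases h : lo ≤ s
  · simp [h, (not_lt.mpr h)]
  · simp [min_def, h, (lt_of_not_ge h)]

theorem pv_max_alt (hi s : String) : (if hi < s then s else hi) = max hi s := by
  by_cases h : hi ≤ s
  · rcases eq_or_lt_of_le h with rfl | h'
    · simp
    · simp [h, h']
  · simp [max_def, h, (not_lt.mpr (le_of_not_ge h))]

theorem pvAlt_fold_some (ms : List (List (String × String))) (lo hi : String) :
    ms.foldl pvAltStep (some (lo, hi)) =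
      some ((ms.filterMap pvTsOf).foldl min lo, (ms.filterMap pvTsOf).foldl max hi) := by
  induction ms generalizing lo hi with
  | nil => simp
  | cons m t ih =>
    rw [List.foldl_cons, List.filterMap_cons]
    cases h : (PySem.Dict.mk m).get? "timestamp" with
    | none =>
      have ht : pvTsOf m = none := by simp [pvTsOf, h]
      have hstep : pvAltStep (some (lo, hi)) m = some (lo, hi) := by simp [pvAltStep, h]
      rw [hstep, ht]
      simpa using ih lo hi
    | some s =>
      by_cases hs : s = ""
      · have ht : pvTsOf m = none := by simp [pvTsOf, h, hs]
        have hstep : pvAltStep (some (lo, hi)) m = some (lo, hi) := by simp [pvAltStep, h, hs]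
        rw [hstep, ht]
        simpa using ih lo hi
      · have ht : pvTsOf m = some s := by simp [pvTsOf, h, hs]
        have hstep : pvAltStep (some (lo, hi)) m =
            some ((if s < lo then s else lo), (if hi < s then s else hi)) := by
          simp [pvAltStep, h, hs]
        rw [hstep, ht, ih, pv_min_alt, pv_max_alt]
        simp [List.foldl_cons]

theorem pvAlt_fold_none (ms : List (List (String × String))) :
    ms.foldl pvAltStep none =
      (match ms.filterMap pvTsOf with
       | [] => none
       | t :: ts => some (ts.foldl min t, ts.foldl max t)) := by
  induction ms with
  | nil => simp
  | cons m t ih =>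
    rw [List.foldl_cons, List.filterMap_cons]
    cases h : (PySem.Dict.mk m).get? "timestamp" with
    | none =>
      have ht : pvTsOf m = none := by simp [pvTsOf, h]
      have hstep : pvAltStep none m = none := by simp [pvAltStep, h]
      rw [hstep, ht]
      simpa using ih
    | some s =>
      by_cases hs : s = ""
      · have ht : pvTsOf m = none := by simp [pvTsOf, h, hs]
        have hstep : pvAltStep none m = none := by simp [pvAltStep, h, hs]
        rw [hstep, ht]
        simpa using ih
      · have ht : pvTsOf m = some s := by simp [pvTsOf, h, hs]
        have hstep : pvAltStep none m = some (s, s) := by simp [pvAltStep, h, hs]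
        rw [hstep, ht, pvAlt_fold_some]

-- ===== VERDICT (by name: the statement is the Claim_ definition above) =====
theorem get_conversation_timerange_py_spec : Claim_equal_get_conversation_timerange_py := by
  intro messages _
  unfold Spec_get_conversation_timerange_py
  unfold get_conversation_timerange_py get_conversation_timerange_py_alt
  rw [pvAlt_fold_none]
  by_cases hm : messages = []
  · simp [hm]
  · simp only [hm, if_false]
    cases h : messages.filterMap pvTsOf with
    | nil => simp
    | cons t ts =>
      simp [PySem.List.min?_id_cons, PySem.List.max?_id_cons]
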